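-- pv_equiv track=rewrite | github.com/cyberowl1/artificial-intelligence | tictactoe/tictactoe.py | checkFirstDig
-- ===== SOURCE A (Python) =====
-- def checkFirstDig(board, player):
--     count=0
--     for row in range (len(board)):
--         for col in range (len(board[row])):
--             if row==col and board[row][col]==player:
--                 count+=1
--     if count==3:
--         return True
--     else:
--         return False
-- ===== SOURCE B (Python) =====
-- def checkFirstDig(board, player):
--     return sum(1 for i in range(len(board)) if i < len(board[i]) and board[i][i] == player) == 3
-- ===== Notes on version B (the rewrite author's own statement) =====
-- stated objective: simpler
-- what changed: Replaces A's nested scan over every cell of every row (counting only where row==col) by a single pass over the diagonal indices i with a ragged-row guard i < len(board[i]), keeping the hardcoded ==3 test.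
import Mathlib
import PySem

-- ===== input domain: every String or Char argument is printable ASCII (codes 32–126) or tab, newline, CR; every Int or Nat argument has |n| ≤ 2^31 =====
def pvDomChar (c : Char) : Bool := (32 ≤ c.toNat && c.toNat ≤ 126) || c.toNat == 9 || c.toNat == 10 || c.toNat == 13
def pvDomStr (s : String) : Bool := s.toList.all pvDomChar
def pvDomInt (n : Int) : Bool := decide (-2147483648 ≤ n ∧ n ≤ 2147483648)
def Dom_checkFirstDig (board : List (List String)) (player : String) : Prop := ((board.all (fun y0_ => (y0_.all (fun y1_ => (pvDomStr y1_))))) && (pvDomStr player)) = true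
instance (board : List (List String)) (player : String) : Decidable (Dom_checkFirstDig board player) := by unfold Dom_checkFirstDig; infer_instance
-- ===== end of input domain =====

-- B replaces A's nested scan over every cell by a single pass over the diagonal indices; same return value everywhere (both total).

-- ===== PORT A =====
-- nested 'for row in range(len(board)): for col in range(len(board[row])): …'; indices are
-- always in range, so pyGetD's default is never used
def checkFirstDig (board : List (List String)) (player : String) : Bool :=
  let count : Int :=
    (PySem.List.pyRange 0 (board.length : Int)).foldl (fun count row =>
      (PySem.List.pyRange 0 ((PySem.List.pyGetD board row []).length : Int)).foldl (fun count col =>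
        if (row == col && ((PySem.List.pyGetD (PySem.List.pyGetD board row []) col "") == player)) then count + 1 else count) count) 0
  if count == 3 then true else false

-- ===== PORT B =====
-- sum(1 for i in range(len(board)) if i < len(board[i]) and board[i][i] == player) == 3
def checkFirstDig_alt (board : List (List String)) (player : String) : Bool :=
  (List.range board.length).countP (fun i =>
    decide (i < (board.getD i []).length) && ((board.getD i []).getD i "" == player)) == 3

-- ===== PRECONDITION & SPEC =====
def Spec_checkFirstDig (board : List (List String)) (player : String) (out : Bool) : Prop := out = checkFirstDig_alt board player
instance (board : List (List String)) (player : String) (out : Bool) : Decidable (Spec_checkFirstDig board player out) := by unfold Spec_checkFirstDig; infer_instance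

-- ===== CLAIM (what is proved, stated in full; the proofs are below) =====
def Claim_equal_checkFirstDig : Prop := ∀ (board : List (List String)) (player : String), Dom_checkFirstDig board player → Spec_checkFirstDig board player (checkFirstDig board player)

-- ===== LEMMAS AND PROOFS =====

-- counting the one index k in range m that can satisfy 'k == j && p j'
theorem countP_range_eq_single (k m : Nat) (p : Nat → Bool) :
    (List.range m).countP (fun j => decide (k = j) && p j) = if k < m ∧ p k then 1 else 0 := by
  induction m with
  | zero => simp
  | succ m ih =>
    rw [List.range_succ, List.countP_append, ih]
    by_cases hk : k = m
    · subst hk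
      by_cases hp : p k = true <;> simp [hp]
    · have he : (k < m ∧ p k = true) ↔ (k < m + 1 ∧ p k = true) :=
        ⟨fun h => ⟨Nat.lt_succ_of_lt h.1, h.2⟩,
         fun h => ⟨Nat.lt_of_le_of_ne (Nat.lt_succ_iff.mp h.1) hk, h.2⟩⟩
      simp [hk, he]

-- A's inner loop for a fixed row ↑k adds exactly the diagonal contribution
theorem inner_loop_eq (k : Nat) (r : List String) (player : String) (c : Int) :
    (PySem.List.pyRange 0 (r.length : Int)).foldl (fun c col =>
        if ((k : Int) == col && ((PySem.List.pyGetD r col "") == player)) then c + 1 else c) c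
      = c + (if (decide (k < r.length) && (r.getD k "" == player)) then 1 else 0) := by
  rw [PySem.List.foldl_count_if, PySem.List.pyRange_zero_nat, List.countP_map]
  have hc : (List.range r.length).countP
      ((fun col => ((k : Int) == col) && ((PySem.List.pyGetD r col "") == player)) ∘ (fun j : Nat => (j : Int)))
      = (List.range r.length).countP (fun j => decide (k = j) && (r.getD j "" == player)) := by
    apply List.countP_congr
    intro j _
    simp [Function.comp, PySem.List.pyGetD_natCast]
  rw [hc, countP_range_eq_single]
  by_cases h1 : k < r.length <;> by_cases h2 : (r.getD k "" == player) = true <;> simp_all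

theorem count_eq (board : List (List String)) (player : String) :
    (PySem.List.pyRange 0 (board.length : Int)).foldl (fun count row =>
      (PySem.List.pyRange 0 ((PySem.List.pyGetD board row []).length : Int)).foldl (fun count col =>
        if (row == col && ((PySem.List.pyGetD (PySem.List.pyGetD board row []) col "") == player)) then count + 1 else count) count) 0
    = ((List.range board.length).countP (fun i =>
        decide (i < (board.getD i []).length) && ((board.getD i []).getD i "" == player)) : Int) := by
  rw [PySem.List.pyRange_zero_nat, List.foldl_map]
  have hstep : ∀ (c : Int) (k : Nat),
      (PySem.List.pyRange 0 ((PySem.List.pyGetD board (k : Int) []).length : Int)).foldl (fun c col =>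
        if ((k : Int) == col && ((PySem.List.pyGetD (PySem.List.pyGetD board (k : Int) []) col "") == player)) then c + 1 else c) c
      = (if (decide (k < (board.getD k []).length) && ((board.getD k []).getD k "" == player)) then c + 1 else c) := by
    intro c k
    rw [PySem.List.pyGetD_natCast, inner_loop_eq]
    split_ifs <;> omega
  simp only [hstep]
  rw [PySem.List.foldl_count_if]
  simp

-- ===== VERDICT (by name: the statement is the Claim_ definition above) =====
theorem checkFirstDig_spec : Claim_equal_checkFirstDig := by
  intro board player _
  unfold Spec_checkFirstDig checkFirstDig checkFirstDig_alt
  rw [count_eq]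
  generalize (List.range board.length).countP _ = cnt
  have h3 : ((cnt : Int) = 3) ↔ cnt = 3 := by omega
  by_cases h : cnt = 3 <;> simp [h3, h]
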